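-- pv_equiv track=rewrite | github.com/A-cpu-rg/Mini-OS-Project | tools/strip_c_comments.py | strip_comments_preserve_layout
-- ===== SOURCE A (Python) =====
-- def strip_comments_preserve_layout(src: str) -> str:
--     OUT: list[str] = []
--     i = 0
--     n = len(src)
--
--     in_sl_comment = False
--     in_ml_comment = False
--     in_str = False
--     str_quote = ""
--     esc = False
--
--     while i < n:
--         ch = src[i]
--         nxt = src[i + 1] if i + 1 < n else ""
--
--         if in_sl_comment:
--             if ch == "\n":
--                 in_sl_comment = False
--                 OUT.append("\n")
--             else:
--                 OUT.append(" ")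
--             i += 1
--             continue
--
--         if in_ml_comment:
--             if ch == "*" and nxt == "/":
--                 OUT.append(" ")
--                 OUT.append(" ")
--                 in_ml_comment = False
--                 i += 2
--                 continue
--             if ch == "\n":
--                 OUT.append("\n")
--             else:
--                 OUT.append(" ")
--             i += 1
--             continue
--
--         if in_str:
--             OUT.append(ch)
--             if esc:
--                 esc = False
--             else:
--                 if ch == "\\":
--                     esc = True
--                 elif ch == str_quote:
--                     in_str = False
--                     str_quote = ""
--             i += 1
--             continue
--
--         if ch == '"' or ch == "'":
--             in_str = True
--             str_quote = ch
--             OUT.append(ch)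
--             i += 1
--             continue
--
--         if ch == "/" and nxt == "/":
--             in_sl_comment = True
--             OUT.append(" ")
--             OUT.append(" ")
--             i += 2
--             continue
--
--         if ch == "/" and nxt == "*":
--             in_ml_comment = True
--             OUT.append(" ")
--             OUT.append(" ")
--             i += 2
--             continue
--
--         OUT.append(ch)
--         i += 1
--
--     return "".join(OUT)
-- ===== SOURCE B (Python) =====
-- def strip_comments_preserve_layout(src: str) -> str:
--     out: list[str] = []
--     i = 0
--     n = len(src)
--     while i < n:
--         ch = src[i]
--         if ch == "/" and src.startswith("//", i):
--             out.append("  ")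
--             j = src.find("\n", i + 2)
--             if j == -1:
--                 out.append(" " * (n - i - 2))
--                 i = n
--             else:
--                 out.append(" " * (j - i - 2))
--                 out.append("\n")
--                 i = j + 1
--         elif ch == "/" and src.startswith("/*", i):
--             out.append("  ")
--             j = src.find("*/", i + 2)
--             end = n if j == -1 else j
--             out.append("".join("\n" if c == "\n" else " " for c in src[i + 2:end]))
--             if j == -1:
--                 i = n
--             else:
--                 out.append("  ")
--                 i = j + 2
--         elif ch == '"' or ch == "'":
--             out.append(ch)
--             i += 1
--             while i < n:
--                 k = i
--                 while k < n and src[k] != "\\" and src[k] != ch: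
--                     k += 1
--                 if k == n:
--                     out.append(src[i:])
--                     i = n
--                 elif src[k] == "\\":
--                     out.append(src[i:k + 2])
--                     i = k + 2
--                 else:
--                     out.append(src[i:k + 1])
--                     i = k + 1
--                     break
--         else:
--             out.append(ch)
--             i += 1
--     return "".join(out)
-- ===== Notes on version B (the rewrite author's own statement) =====
-- stated objective: alternative
-- what changed: Replaced A's per-character boolean-flag state machine with a find-driven segment scanner: at a line-comment opener it jumps straight to the next newline, at a block-comment opener to the closing delimiter, and inside string literals to the next backslash or closing quote, emitting whole blanked/copied segments at once instead of re-testing five state flags per character.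
import Mathlib
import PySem

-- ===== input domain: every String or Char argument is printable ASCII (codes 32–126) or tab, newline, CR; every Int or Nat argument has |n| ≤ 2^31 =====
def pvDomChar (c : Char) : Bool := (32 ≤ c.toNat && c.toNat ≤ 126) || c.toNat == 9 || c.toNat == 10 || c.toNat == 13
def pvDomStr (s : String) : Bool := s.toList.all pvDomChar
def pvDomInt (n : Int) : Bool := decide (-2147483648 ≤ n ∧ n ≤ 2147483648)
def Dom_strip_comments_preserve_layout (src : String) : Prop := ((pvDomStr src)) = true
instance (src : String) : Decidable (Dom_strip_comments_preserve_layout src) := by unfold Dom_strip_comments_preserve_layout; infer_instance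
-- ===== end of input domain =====

-- B replaces A's per-character boolean-flag state machine by a find-driven segment
-- scanner (jump to the next '\n', '*/', or quote/backslash and emit whole segments);
-- objective: alternative decomposition, same exact output.

-- ===== PORT A =====
-- A's while-loop over i with flags (in_sl_comment, in_ml_comment, in_str, str_quote, esc);
-- str_quote = "" is represented as `none`. `rest.head?` is Python's `nxt` ("" = none).
def stripA (sl ml instr : Bool) (q : Option Char) (esc : Bool) : List Char → List Char
  | [] => []
  | ch :: rest =>
    if sl then
      if ch = '\n' then '\n' :: stripA false ml instr q esc rest
      else ' ' :: stripA sl ml instr q esc rest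
    else if ml then
      if ch = '*' ∧ rest.head? = some '/' then
        ' ' :: ' ' :: stripA sl false instr q esc rest.tail
      else if ch = '\n' then '\n' :: stripA sl ml instr q esc rest
      else ' ' :: stripA sl ml instr q esc rest
    else if instr then
      ch :: (if esc then stripA sl ml instr q false rest
             else if ch = '\\' then stripA sl ml instr q true rest
             else if some ch = q then stripA sl ml false none esc rest
             else stripA sl ml instr q esc rest)
    else if ch = '"' ∨ ch = '\'' then
      ch :: stripA sl ml true (some ch) esc rest
    else if ch = '/' ∧ rest.head? = some '/' then
      ' ' :: ' ' :: stripA true ml instr q esc rest.tail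
    else if ch = '/' ∧ rest.head? = some '*' then
      ' ' :: ' ' :: stripA sl true instr q esc rest.tail
    else ch :: stripA sl ml instr q esc rest
  termination_by l => l.length
  decreasing_by all_goals (simp [List.length_tail]; try omega)

def strip_comments_preserve_layout (src : String) : String :=
  String.mk (stripA false false false none false src.toList)

-- ===== PORT B =====
-- Source B's `src.find("\n", i)` on the remaining characters
def findNL : List Char → Option Nat
  | [] => none
  | c :: t => if c = '\n' then some 0 else (findNL t).map (· + 1)

-- Source B's `src.find("*/", i)` on the remaining characters
def findSS : List Char → Option Nat
  | [] => none
  | c :: t => if c = '*' ∧ t.head? = some '/' then some 0 else (findSS t).map (· + 1)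

-- Source B's inner `while k < n and src[k] != '\\' and src[k] != ch` scan
def findSpec (q : Char) : List Char → Option Nat
  | [] => none
  | c :: t => if c = '\\' ∨ c = q then some 0 else (findSpec q t).map (· + 1)

theorem findSpec_lt_length {q : Char} : ∀ {l : List Char} {k : Nat}, findSpec q l = some k → k < l.length := by
  intro l
  induction l with
  | nil => intro k h; simp [findSpec] at h
  | cons c t ih =>
    intro k h
    by_cases hc : c = '\\' ∨ c = q
    · simp [findSpec, hc] at h; simp only [List.length_cons]; omega
    · simp [findSpec, hc] at h
      obtain ⟨j, hj, rfl⟩ := h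
      have := ih hj
      simp only [List.length_cons]; omega

-- Source B's string-copying inner while-loop: returns (chars copied, remaining input)
def strLoopB (q : Char) (l : List Char) : List Char × List Char :=
  match h : findSpec q l with
  | none => (l, [])
  | some k =>
    if l.getD k ' ' = '\\' then
      let p := strLoopB q (l.drop (k + 2))
      (l.take (k + 2) ++ p.1, p.2)
    else (l.take (k + 1), l.drop (k + 1))
  termination_by l.length
  decreasing_by
    have := findSpec_lt_length h
    simp only [List.length_drop]
    omega

theorem strLoopB_eq (q : Char) (l : List Char) : strLoopB q l =
    (match findSpec q l with
     | none => (l, [])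
     | some k =>
       if l.getD k ' ' = '\\' then
         (l.take (k + 2) ++ (strLoopB q (l.drop (k + 2))).1, (strLoopB q (l.drop (k + 2))).2)
       else (l.take (k + 1), l.drop (k + 1))) := by
  rw [strLoopB]
  cases hf : findSpec q l with
  | none => simp
  | some k => by_cases hbs : l.getD k ' ' = '\\' <;> simp [hbs]

theorem strLoopB_snd_length (q : Char) : ∀ l : List Char, (strLoopB q l).2.length ≤ l.length := by
  intro l
  generalize hn : l.length = n
  induction n using Nat.strong_induction_on generalizing l with
  | _ n ih =>
    subst hn
    rw [strLoopB_eq]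
    cases hf : findSpec q l with
    | none => simp
    | some k =>
      dsimp only
      have hk := findSpec_lt_length hf
      by_cases hbs : l.getD k ' ' = '\\'
      · rw [if_pos hbs]
        have := ih (l.drop (k + 2)).length (by simp; omega) (l.drop (k + 2)) rfl
        simp at this ⊢
        omega
      · rw [if_neg hbs]
        simp

-- '\n' stays '\n', every other comment character becomes ' '
def mapml (c : Char) : Char := if c = '\n' then '\n' else ' '

def stripB : List Char → List Char
  | [] => []
  | ch :: rest =>
    if ch = '/' ∧ rest.head? = some '/' then
      match findNL rest.tail with
      | none => ' ' :: ' ' :: List.replicate rest.tail.length ' '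
      | some j => ' ' :: ' ' :: (List.replicate j ' ' ++ '\n' :: stripB (rest.tail.drop (j + 1)))
    else if ch = '/' ∧ rest.head? = some '*' then
      match findSS rest.tail with
      | none => ' ' :: ' ' :: rest.tail.map mapml
      | some k => ' ' :: ' ' :: ((rest.tail.take k).map mapml ++ ' ' :: ' ' :: stripB (rest.tail.drop (k + 2)))
    else if ch = '"' ∨ ch = '\'' then
      ch :: ((strLoopB ch rest).1 ++ stripB ((strLoopB ch rest).2))
    else ch :: stripB rest
  termination_by l => l.length
  decreasing_by
    · simp only [List.length_cons, List.length_drop, List.length_tail]; omega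
    · simp only [List.length_cons, List.length_drop, List.length_tail]; omega
    · have := strLoopB_snd_length ch rest; simp only [List.length_cons]; omega
    · simp only [List.length_cons]; omega

def strip_comments_preserve_layout_alt (src : String) : String :=
  String.mk (stripB src.toList)

-- ===== PRECONDITION & SPEC =====
def Spec_strip_comments_preserve_layout (src : String) (out : String) : Prop := out = strip_comments_preserve_layout_alt src
instance (src : String) (out : String) : Decidable (Spec_strip_comments_preserve_layout src out) := by unfold Spec_strip_comments_preserve_layout; infer_instance

-- ===== CLAIM (what is proved, stated in full; the proofs are below) =====
def Claim_equal_strip_comments_preserve_layout : Prop := ∀ (src : String), Dom_strip_comments_preserve_layout src → Spec_strip_comments_preserve_layout src (strip_comments_preserve_layout src)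

-- ===== LEMMAS AND PROOFS =====

-- A in single-line-comment mode = spaces up to the next newline
theorem stripA_sl : ∀ l : List Char, stripA true false false none false l =
    (match findNL l with
     | none => List.replicate l.length ' '
     | some j => List.replicate j ' ' ++ '\n' :: stripA false false false none false (l.drop (j + 1))) := by
  intro l
  induction l with
  | nil => simp [stripA, findNL]
  | cons c t ih =>
    by_cases hc : c = '\n'
    · subst hc; simp [stripA, findNL]
    · simp only [stripA, if_pos, hc, if_neg, if_true, findNL, if_false]
      rw [ih]
      cases h : findNL t with
      | none => simp [h, List.replicate_succ]
      | some j => simp [h, List.replicate_succ]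

-- A in multi-line-comment mode = mapml up to the closing "*/"
theorem stripA_ml : ∀ l : List Char, stripA false true false none false l =
    (match findSS l with
     | none => l.map mapml
     | some k => (l.take k).map mapml ++ ' ' :: ' ' :: stripA false false false none false (l.drop (k + 2))) := by
  intro l
  induction l with
  | nil => simp [stripA, findSS]
  | cons c t ih =>
    by_cases hc : c = '*' ∧ t.head? = some '/'
    · obtain ⟨rfl, ht⟩ := hc
      cases t with
      | nil => simp at ht
      | cons d t' =>
        simp at ht; subst ht
        simp [stripA, findSS]
    · simp only [stripA, if_true, if_neg, hc]
      rw [show (if c = '\n' then '\n' :: stripA false true false none false t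
               else ' ' :: stripA false true false none false t) = mapml c :: stripA false true false none false t
          from by by_cases h : c = '\n' <;> simp [mapml, h]]
      rw [ih]
      cases h : findSS t with
      | none => simp [findSS, hc, h]
      | some k => simp [findSS, hc, h]

theorem strLoopB_cons (q c : Char) (t : List Char) (h1 : ¬ (c = '\\' ∨ c = q)) :
    strLoopB q (c :: t) = (c :: (strLoopB q t).1, (strLoopB q t).2) := by
  rw [strLoopB_eq q (c :: t), strLoopB_eq q t]
  rw [show findSpec q (c :: t) = (findSpec q t).map (· + 1) from by simp [findSpec, h1]]
  cases h : findSpec q t with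
  | none => simp
  | some k =>
    dsimp only [Option.map_some]
    rw [List.getD_cons_succ]
    by_cases hbs : t.getD k ' ' = '\\'
    · rw [if_pos hbs, if_pos hbs]
      simp [List.take_succ_cons, List.drop_succ_cons, Nat.add_right_comm]
    · rw [if_neg hbs, if_neg hbs]
      simp [List.take_succ_cons, List.drop_succ_cons]

-- A in string mode (esc = false) = B's string-copying loop, then A back in normal mode
theorem stripA_str : ∀ (l : List Char) (q : Char), stripA false false true (some q) false l =
    (strLoopB q l).1 ++ stripA false false false none false ((strLoopB q l).2) := by
  intro l
  generalize hn : l.length = n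
  induction n using Nat.strong_induction_on generalizing l with
  | _ n ih =>
    subst hn
    intro q
    match l with
    | [] => simp [stripA, strLoopB_eq, findSpec]
    | c :: t =>
      by_cases hbs : c = '\\'
      · subst hbs
        rw [show stripA false false true (some q) false ('\\' :: t) =
            '\\' :: stripA false false true (some q) true t from by rw [stripA]; simp]
        rw [strLoopB_eq]
        rw [show findSpec q ('\\' :: t) = some 0 from by simp [findSpec]]
        dsimp only
        rw [if_pos (show ('\\' :: t).getD 0 ' ' = '\\' from rfl)]
        cases t with
        | nil => simp [stripA, strLoopB_eq, findSpec]
        | cons d t' =>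
          rw [show stripA false false true (some q) true (d :: t') =
              d :: stripA false false true (some q) false t' from by rw [stripA]; simp]
          have := ih t'.length (by simp) t' rfl q
          simp only [List.take, List.drop, this]
          simp
      · by_cases hq : c = q
        · subst hq
          rw [show stripA false false true (some c) false (c :: t) =
              c :: stripA false false false none false t from by rw [stripA]; simp [hbs]]
          rw [strLoopB_eq]
          rw [show findSpec c (c :: t) = some 0 from by simp [findSpec]]
          dsimp only
          rw [if_neg (show ¬ ((c :: t).getD 0 ' ' = '\\') from by simpa using hbs)]
          simp
        · rw [show stripA false false true (some q) false (c :: t) =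
              c :: stripA false false true (some q) false t from by
                rw [stripA]; simp [hbs, show ¬ (some c = some q) from by simpa using hq]]
          rw [strLoopB_cons q c t (by tauto)]
          have := ih t.length (by simp) t rfl q
          simp [this]

-- main equivalence on character lists
theorem stripAB : ∀ l : List Char, stripA false false false none false l = stripB l := by
  intro l
  generalize hn : l.length = n
  induction n using Nat.strong_induction_on generalizing l with
  | _ n ih =>
    subst hn
    match l with
    | [] => simp [stripA, stripB]
    | ch :: rest =>
      by_cases h1 : ch = '/' ∧ rest.head? = some '/'
      · obtain ⟨rfl, hh⟩ := h1
        cases rest with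
        | nil => simp at hh
        | cons d t =>
          simp only [List.head?_cons, Option.some.injEq] at hh
          subst hh
          rw [show stripA false false false none false ('/' :: '/' :: t) =
              ' ' :: ' ' :: stripA true false false none false t from by rw [stripA]; simp]
          rw [stripB]
          simp only [List.head?_cons, List.tail_cons, and_self, if_pos]
          rw [stripA_sl t]
          cases hnl : findNL t with
          | none => simp
          | some j =>
            dsimp only
            have := ih (t.drop (j + 1)).length (by simp; omega) (t.drop (j + 1)) rfl
            rw [this]
      · by_cases h2 : ch = '/' ∧ rest.head? = some '*'
        · obtain ⟨rfl, hh⟩ := h2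
          cases rest with
          | nil => simp at hh
          | cons d t =>
            simp only [List.head?_cons, Option.some.injEq] at hh
            subst hh
            rw [show stripA false false false none false ('/' :: '*' :: t) =
                ' ' :: ' ' :: stripA false true false none false t from by rw [stripA]; simp]
            rw [stripB]
            simp only [List.head?_cons, List.tail_cons, and_self, if_pos]
            rw [stripA_ml t]
            have hne : ¬ ('/' = '/' ∧ some '*' = some '/') := by simp
            rw [if_neg (by simpa using hne)]
            cases hss : findSS t with
            | none => simp
            | some k =>
              dsimp only
              have := ih (t.drop (k + 2)).length (by simp; omega) (t.drop (k + 2)) rfl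
              rw [this]
        · by_cases h3 : ch = '"' ∨ ch = '\''
          · rw [show stripA false false false none false (ch :: rest) =
                ch :: stripA false false true (some ch) false rest from by
                  rw [stripA]; simp [h3]]
            rw [stripB]
            rw [if_neg h1, if_neg h2, if_pos h3]
            rw [stripA_str rest ch]
            have hle := strLoopB_snd_length ch rest
            have := ih ((strLoopB ch rest).2).length (by simp; omega) ((strLoopB ch rest).2) rfl
            rw [this]
          · rw [show stripA false false false none false (ch :: rest) =
                ch :: stripA false false false none false rest from by
                  rw [stripA]; simp [h1, h2, h3]]
            rw [stripB]
            rw [if_neg h1, if_neg h2, if_neg h3]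
            have := ih rest.length (by simp) rest rfl
            rw [this]

-- ===== VERDICT (by name: the statement is the Claim_ definition above) =====
theorem strip_comments_preserve_layout_spec : Claim_equal_strip_comments_preserve_layout := by
  intro src _
  unfold Spec_strip_comments_preserve_layout strip_comments_preserve_layout strip_comments_preserve_layout_alt
  rw [stripAB]
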